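-- pv_equiv track=rewrite | github.com/StranikS-Scan/WorldOfTanks-Decompiled | source/res/scripts/common/battle_pass_integration.py | _checkBattleRoyalePointsSequence
-- ===== SOURCE A (Python) =====
-- from copy import copy
--
-- def _checkBattleRoyalePointsSequence(points, thresholdTargetCount):
--     if any((point != 0 for point in points['win'][1:])):
--         return False
--     mergedPoints = copy(points['lose'])
--     mergedPoints[0] = points['win'][0]
--     sortedMergedPoints = copy(mergedPoints)
--     sortedMergedPoints.sort(reverse=True)
--     if sortedMergedPoints != mergedPoints:
--         return False
--     pointsValues = set(sortedMergedPoints)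
--     pointsValues.discard(0)
--     return False if len(pointsValues) != thresholdTargetCount else True
-- ===== SOURCE B (Python) =====
-- def _checkBattleRoyalePointsSequence(points, thresholdTargetCount):
--     win = points['win']
--     if any(p != 0 for p in win[1:]):
--         return False
--     merged = [win[0]] + points['lose'][1:]
--     for i in range(len(merged) - 1):
--         if merged[i] < merged[i + 1]:
--             return False
--     distinct = set()
--     for v in merged:
--         if v != 0:
--             distinct.add(v)
--     return len(distinct) == thresholdTargetCount
-- ===== Notes on version B (the rewrite author's own statement) =====
-- stated objective: simpler
-- what changed: Replaced the copy-sort-and-compare test by a single linear adjacent-pairs non-increasing scan with early exit, and the sorted-list set construction plus discard(0) by one accumulating pass that collects distinct nonzero values directly.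
import Mathlib
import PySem

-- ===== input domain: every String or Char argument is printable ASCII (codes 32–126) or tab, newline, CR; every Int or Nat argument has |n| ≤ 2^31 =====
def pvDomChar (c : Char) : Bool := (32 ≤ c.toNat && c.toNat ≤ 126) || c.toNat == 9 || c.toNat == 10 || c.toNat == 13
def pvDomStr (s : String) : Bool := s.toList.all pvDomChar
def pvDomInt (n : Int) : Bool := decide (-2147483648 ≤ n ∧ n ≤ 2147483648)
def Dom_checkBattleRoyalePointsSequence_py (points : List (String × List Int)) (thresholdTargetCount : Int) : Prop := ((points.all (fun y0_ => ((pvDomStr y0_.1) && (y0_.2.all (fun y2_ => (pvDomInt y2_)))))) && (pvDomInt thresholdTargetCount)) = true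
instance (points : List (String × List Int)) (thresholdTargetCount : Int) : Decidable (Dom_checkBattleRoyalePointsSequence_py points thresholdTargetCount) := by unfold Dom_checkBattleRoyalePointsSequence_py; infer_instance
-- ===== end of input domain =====

-- B replaces A's copy-sort-and-compare by a single linear non-increasing scan and counts
-- the distinct nonzero values in one accumulating pass (objective: simpler / O(n) scan instead of a sort).

-- ===== PORT A =====
def checkBattleRoyalePointsSequence_py (points : List (String × List Int)) (thresholdTargetCount : Int) : Bool :=
  match (PySem.Dict.mk points).get? "win" with
  | none => false  -- KeyError: excluded by Pre_
  | some win =>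
    if (PySem.List.slice win (some 1) none).any (fun point => point != 0) then false
    else
      match (PySem.Dict.mk points).get? "lose" with
      | none => false  -- KeyError: excluded by Pre_
      | some lose =>
        match PySem.List.pyGet? win 0, lose with
        | some w0, _ :: loseRest =>
            -- mergedPoints = copy(points['lose']); mergedPoints[0] = points['win'][0]
            let mergedPoints : List Int := w0 :: loseRest
            let sortedMergedPoints := PySem.List.sorted mergedPoints (fun x => x) true
            if sortedMergedPoints ≠ mergedPoints then false
            else
              let pointsValues := PySem.Set.discard (PySem.Set.ofList sortedMergedPoints) 0
              if PySem.Set.len pointsValues ≠ thresholdTargetCount then false else true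
        | _, _ => false  -- IndexError (win[0] on empty win, or store into empty mergedPoints): excluded by Pre_

-- ===== PORT B =====
def altNonIncreasing : List Int → Bool
  | [] => true
  | [_] => true
  | a :: b :: rest => if a < b then false else altNonIncreasing (b :: rest)

def altDistinctNonZero (merged : List Int) : PySem.Set Int :=
  merged.foldl (fun s v => if v != 0 then PySem.Set.add s v else s) PySem.Set.empty

def checkBattleRoyalePointsSequence_py_alt (points : List (String × List Int)) (thresholdTargetCount : Int) : Bool :=
  match (PySem.Dict.mk points).get? "win" with
  | none => false  -- KeyError, as in B
  | some win =>
    if (PySem.List.slice win (some 1) none).any (fun p => p != 0) then false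
    else
      match (PySem.Dict.mk points).get? "lose" with
      | none => false  -- KeyError, as in B
      | some lose =>
        match PySem.List.pyGet? win 0 with
        | none => false  -- IndexError win[0], as in B
        | some w0 =>
          let merged : List Int := w0 :: PySem.List.slice lose (some 1) none
          if altNonIncreasing merged = false then false
          else decide (PySem.Set.len (altDistinctNonZero merged) = thresholdTargetCount)

-- ===== PRECONDITION & SPEC =====
-- Pre_ excludes exactly the inputs where A raises: a missing 'win' key; and, when the win-tail
-- test passes, a missing 'lose' key, an empty win list (IndexError on win[0]) or an empty lose
-- list (IndexError storing into mergedPoints[0]).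
def pvPreB (points : List (String × List Int)) : Bool :=
  match (PySem.Dict.mk points).get? "win" with
  | none => false
  | some win =>
    if (PySem.List.slice win (some 1) none).any (fun p => p != 0) then true
    else
      match (PySem.Dict.mk points).get? "lose" with
      | none => false
      | some lose => !win.isEmpty && !lose.isEmpty

def Pre_checkBattleRoyalePointsSequence_py (points : List (String × List Int)) (thresholdTargetCount : Int) : Prop :=
  pvPreB points = true
instance (points : List (String × List Int)) (thresholdTargetCount : Int) : Decidable (Pre_checkBattleRoyalePointsSequence_py points thresholdTargetCount) := by unfold Pre_checkBattleRoyalePointsSequence_py; infer_instance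

def pvWitness_checkBattleRoyalePointsSequence_py : (List (String × List Int)) × Int :=
  ([("win", [3]), ("lose", [3, 2, 0])], 2)

def Spec_checkBattleRoyalePointsSequence_py (points : List (String × List Int)) (thresholdTargetCount : Int) (out : Bool) : Prop := out = checkBattleRoyalePointsSequence_py_alt points thresholdTargetCount
instance (points : List (String × List Int)) (thresholdTargetCount : Int) (out : Bool) : Decidable (Spec_checkBattleRoyalePointsSequence_py points thresholdTargetCount out) := by unfold Spec_checkBattleRoyalePointsSequence_py; infer_instance

-- ===== CLAIM (what is proved, stated in full; the proofs are below) =====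
def Claim_equal_checkBattleRoyalePointsSequence_py : Prop := ∀ (points : List (String × List Int)) (thresholdTargetCount : Int), Dom_checkBattleRoyalePointsSequence_py points thresholdTargetCount → Pre_checkBattleRoyalePointsSequence_py points thresholdTargetCount → Spec_checkBattleRoyalePointsSequence_py points thresholdTargetCount (checkBattleRoyalePointsSequence_py points thresholdTargetCount)
-- ===== LEMMAS AND PROOFS =====

-- altNonIncreasing is the adjacent-pairs reading of "non-increasing"
theorem altNonIncreasing_iff_pairwise (l : List Int) :
    altNonIncreasing l = true ↔ l.Pairwise (fun a b => b ≤ a) := by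
  haveI : Trans (fun a b : Int => b ≤ a) (fun a b : Int => b ≤ a) (fun a b : Int => b ≤ a) :=
    ⟨fun h1 h2 => le_trans h2 h1⟩
  rw [← List.isChain_iff_pairwise]
  induction l with
  | nil => simp [altNonIncreasing]
  | cons a l ih =>
    cases l with
    | nil => simp [altNonIncreasing]
    | cons b r =>
      by_cases h : a < b
      · simp [altNonIncreasing, h, List.isChain_cons_cons, not_le.mpr h]
      · simp [altNonIncreasing, h, List.isChain_cons_cons, not_lt.mp h, ih]

-- "sorted(merged, reverse=True) == merged" is exactly the linear non-increasing scan
theorem sorted_rev_eq_iff_altNonIncreasing (l : List Int) :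
    (PySem.List.sorted l (fun x => x) true = l) ↔ altNonIncreasing l = true := by
  constructor
  · intro h
    rw [altNonIncreasing_iff_pairwise]
    have := PySem.List.sorted_pairwise_rev l (fun x : Int => x)
    rwa [h] at this
  · intro h
    exact PySem.List.sorted_rev_eq_self_of_pairwise l (fun x => x)
      ((altNonIncreasing_iff_pairwise l).mp h)

theorem step_discard (s : PySem.Set Int) (v : Int) :
    (if v != 0 then PySem.Set.add (PySem.Set.discard s 0) v else PySem.Set.discard s 0)
      = PySem.Set.discard (PySem.Set.add s v) 0 := by
  by_cases hv : v = 0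
  · subst hv
    simp only [bne_self_eq_false, Bool.false_eq_true, if_false]
    by_cases hm : (0 : Int) ∈ s
    · rw [PySem.Set.add_of_mem hm]
    · rw [PySem.Set.add_of_not_mem hm]
      simp [PySem.Set.discard]
  · rw [if_pos (by simpa using hv)]
    by_cases hm : v ∈ s
    · rw [PySem.Set.add_of_mem hm,
        PySem.Set.add_of_mem ((PySem.Set.mem_discard s 0 v).mpr ⟨hm, hv⟩)]
    · rw [PySem.Set.add_of_not_mem hm,
        PySem.Set.add_of_not_mem (fun hc => hm ((PySem.Set.mem_discard s 0 v).mp hc).1)]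
      simp [PySem.Set.discard, hv]

-- the one-pass nonzero-distinct accumulation equals set(l).discard(0)
theorem foldl_step_discard (l : List Int) (s : PySem.Set Int) (hs : s.Nodup) :
    l.foldl (fun s v => if v != 0 then PySem.Set.add s v else s) (PySem.Set.discard s 0)
      = PySem.Set.discard (PySem.Set.update s l) 0 := by
  induction l generalizing s with
  | nil => rw [PySem.Set.update_nil, List.foldl_nil]
  | cons v rest ih =>
    rw [PySem.Set.update_cons, List.foldl_cons, step_discard s v,
      ih (PySem.Set.add s v) (PySem.Set.nodup_add s v hs)]

theorem altDistinctNonZero_eq (l : List Int) :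
    altDistinctNonZero l = PySem.Set.discard (PySem.Set.ofList l) 0 := by
  have h := foldl_step_discard l PySem.Set.empty List.nodup_nil
  simpa [altDistinctNonZero, PySem.Set.discard, PySem.Set.empty,
    PySem.Set.update_empty] using h

-- ===== VERDICT (by name: the statement is the Claim_ definition above) =====
theorem checkBattleRoyalePointsSequence_py_spec : Claim_equal_checkBattleRoyalePointsSequence_py := by
  intro points t _ hPre
  unfold Spec_checkBattleRoyalePointsSequence_py
  unfold Pre_checkBattleRoyalePointsSequence_py pvPreB at hPre
  unfold checkBattleRoyalePointsSequence_py checkBattleRoyalePointsSequence_py_alt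
  cases hwin : (PySem.Dict.mk points).get? "win" with
  | none => rw [hwin] at hPre
  | some win =>
    rw [hwin] at hPre
    simp only [] at hPre ⊢
    by_cases hany : ((PySem.List.slice win (some 1) none).any fun p => p != 0) = true
    · simp only [hany, if_true]
    · have hany' := eq_false_of_ne_true hany
      simp only [hany', Bool.false_eq_true, if_false] at hPre ⊢
      cases hlose : (PySem.Dict.mk points).get? "lose" with
      | none => rw [hlose] at hPre
      | some lose =>
        rw [hlose] at hPre
        simp only [] at hPre ⊢
        cases win with
        | nil => simp at hPre
        | cons w0 wrest =>
          cases lose with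
          | nil => simp at hPre
          | cons l0 lrest =>
            have hget : PySem.List.pyGet? (w0 :: wrest) 0 = some w0 := by
              simp [PySem.List.pyGet?, PySem.List.pyIdx?]
            rw [hget, PySem.List.slice_from_one]
            simp only [List.tail_cons]
            by_cases hsort : PySem.List.sorted (w0 :: lrest) (fun x => x) true = w0 :: lrest
            · have hni : altNonIncreasing (w0 :: lrest) = true :=
                (sorted_rev_eq_iff_altNonIncreasing _).mp hsort
              simp [hsort, hni, altDistinctNonZero_eq]
            · have hni : altNonIncreasing (w0 :: lrest) = false := by
                cases h' : altNonIncreasing (w0 :: lrest) with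
                | true => exact absurd ((sorted_rev_eq_iff_altNonIncreasing _).mpr h') hsort
                | false => rfl
              simp [hsort, hni]
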